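-- pv_equiv track=rewrite | github.com/zepedro-mf/ATP2024 | TPC8/TPC8 (part 1) - a107278.py | myIndexOf
-- ===== SOURCE A (Python) =====
-- def myIndexOf(s1, s2):
--     lista = s1.split(" ")
--     encontrado = False
--     contador = 0
--     for palavra in lista:
--         contador += 1
--         if palavra == s2:
--             encontrado = True
--             res = contador
--     if not encontrado:
--         res = -1
--     return res
-- ===== SOURCE B (Python) =====
-- def myIndexOf(s1, s2):
--     words = s1.split(" ")
--     n = len(words)
--     for i, w in enumerate(reversed(words)):
--         if w == s2:
--             return n - i
--     return -1
-- ===== Notes on version B (the rewrite author's own statement) =====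
-- stated objective: alternative
-- what changed: B scans the reversed word list and returns at the first match (the last occurrence) instead of forward-scanning the whole list while overwriting the result.
import Mathlib
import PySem

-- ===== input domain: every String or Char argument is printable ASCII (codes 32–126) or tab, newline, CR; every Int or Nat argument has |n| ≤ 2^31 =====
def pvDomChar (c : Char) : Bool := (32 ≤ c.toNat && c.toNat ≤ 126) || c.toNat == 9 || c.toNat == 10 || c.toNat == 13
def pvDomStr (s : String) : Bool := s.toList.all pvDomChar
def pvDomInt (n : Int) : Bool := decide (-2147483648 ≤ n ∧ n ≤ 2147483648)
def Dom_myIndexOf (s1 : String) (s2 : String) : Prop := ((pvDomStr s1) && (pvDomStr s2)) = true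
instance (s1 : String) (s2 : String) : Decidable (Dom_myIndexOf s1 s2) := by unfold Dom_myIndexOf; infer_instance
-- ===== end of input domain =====

-- B finds the last occurrence directly by scanning the reversed word list and returning at the
-- first match (objective: alternative decomposition); A forward-scans all words, overwriting res.

-- ===== PORT A =====
-- state = (encontrado, contador, res); res is only read when encontrado, so its initial value is arbitrary (-1 here).
def myIndexOfStep (s2 : String) (st : Bool × Int × Int) (palavra : String) : Bool × Int × Int :=
  let contador := st.2.1 + 1
  if palavra = s2 then (true, contador, contador) else (st.1, contador, st.2.2)

def myIndexOf (s1 : String) (s2 : String) : Int :=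
  let lista := (PySem.Str.split? s1 " ").getD []
  let st := lista.foldl (myIndexOfStep s2) (false, 0, -1)
  if st.1 then st.2.2 else -1

-- ===== PORT B =====
-- the for-loop over enumerate(reversed(words)): i counts up, returns n - i at the first match
def myIndexOfRev (s2 : String) (n : Int) : List String → Int → Int
  | [], _ => -1
  | w :: rest, i => if w = s2 then n - i else myIndexOfRev s2 n rest (i + 1)

def myIndexOf_alt (s1 : String) (s2 : String) : Int :=
  let words := (PySem.Str.split? s1 " ").getD []
  let n : Int := words.length
  myIndexOfRev s2 n words.reverse 0

-- ===== PRECONDITION & SPEC =====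
def Spec_myIndexOf (s1 : String) (s2 : String) (out : Int) : Prop := out = myIndexOf_alt s1 s2
instance (s1 : String) (s2 : String) (out : Int) : Decidable (Spec_myIndexOf s1 s2 out) := by unfold Spec_myIndexOf; infer_instance

-- ===== CLAIM (what is proved, stated in full; the proofs are below) =====
def Claim_equal_myIndexOf : Prop := ∀ (s1 : String) (s2 : String), Dom_myIndexOf s1 s2 → Spec_myIndexOf s1 s2 (myIndexOf s1 s2)

-- ===== LEMMAS AND PROOFS =====

-- B's scan depends only on n - i
theorem myIndexOfRev_shift (s2 : String) (l : List String) :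
    ∀ (n i : Int), myIndexOfRev s2 (n + 1) l (i + 1) = myIndexOfRev s2 n l i := by
  induction l with
  | nil => intro n i; rfl
  | cons w rest ih =>
      intro n i
      simp only [myIndexOfRev]
      split_ifs with h
      · omega
      · exact ih n (i + 1)

-- core invariant, by induction on the word list from the right
theorem foldA_eq_rev (s2 : String) (ws : List String) :
    (ws.foldl (myIndexOfStep s2) (false, 0, -1)).2.1 = (ws.length : Int) ∧
    (if (ws.foldl (myIndexOfStep s2) (false, 0, -1)).1 then
        (ws.foldl (myIndexOfStep s2) (false, 0, -1)).2.2 else -1)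
      = myIndexOfRev s2 (ws.length : Int) ws.reverse 0 := by
  induction ws using List.reverseRecOn with
  | nil => exact ⟨rfl, rfl⟩
  | append_singleton ws w ih =>
      obtain ⟨hc, hr⟩ := ih
      simp only [List.foldl_append, List.foldl_cons, List.foldl_nil, myIndexOfStep,
        List.reverse_append, List.reverse_cons, List.reverse_nil, List.nil_append,
        List.cons_append, List.length_append, List.length_cons, List.length_nil, hc]
      by_cases h : w = s2
      · simp only [h, if_pos rfl, myIndexOfRev, if_true]
        constructor
        · push_cast; ring
        · push_cast; ring_nf
      · simp only [if_neg h, myIndexOfRev]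
        refine ⟨by push_cast; ring, ?_⟩
        rw [show ((ws.length + 1 : ℕ) : Int) = (ws.length : Int) + 1 by push_cast; ring,
          myIndexOfRev_shift s2 ws.reverse (ws.length : Int) 0]
        exact hr

-- ===== VERDICT (by name: the statement is the Claim_ definition above) =====
theorem myIndexOf_spec : Claim_equal_myIndexOf := by
  intro s1 s2 _
  show myIndexOf s1 s2 = myIndexOf_alt s1 s2
  unfold myIndexOf myIndexOf_alt
  exact (foldA_eq_rev s2 ((PySem.Str.split? s1 " ").getD [])).2
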